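-- pv_equiv track=rewrite | github.com/K6L6/photo2sketch | svg_parser.py | exp_w_order
-- ===== SOURCE A (Python) =====
-- def svg_mix(data):
--     '''recursively changes the starting stroke of the sketch sequence'''
--     fin_lis = []
--     for i in range(len(data)):
--         tmp_lis = data
--         tmp = [tmp_lis[x] for x in range(1,len(tmp_lis))]
--         tmp.append(tmp_lis[0])
--         data=tmp
--         fin_lis.append(tmp)
--         tmp=[]
--     return fin_lis
--
-- def svg_reverse(data):
--     '''reverses direction of stroke'''
--     fin_lis = []
--     for i in reversed(range(len(data))):
--         fin_lis.append(data[i])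
--     return fin_lis
--
-- def exp_w_order(data):
--     '''expands xy-coordinate data. Data produced from svg2xyList.'''
--     data1 = svg_mix(data)
--     reverse_lis = []
--     for i in range(len(data)):
--         inter =svg_reverse(data[i])
--         reverse_lis.append(inter)
--     data2 = svg_mix(reverse_lis)
--     data_ex = data1+data2
--     return data_ex
-- ===== SOURCE B (Python) =====
-- def exp_w_order(data):
--     '''expands xy-coordinate data. Data produced from svg2xyList.'''
--     n = len(data)
--     block1 = [data[i:] + data[:i] for i in range(1, n + 1)]
--     rev = [list(reversed(s)) for s in data]
--     block2 = [rev[i:] + rev[:i] for i in range(1, n + 1)]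
--     return block1 + block2
-- ===== Notes on version B (the rewrite author's own statement) =====
-- stated objective: simpler
-- what changed: Replaces the accumulator-threaded one-step rotation loop (svg_mix) and the index-based per-stroke reversal loop with direct slice-based rotations and a reversed() comprehension, inlining both helpers into one short function.
import Mathlib
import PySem

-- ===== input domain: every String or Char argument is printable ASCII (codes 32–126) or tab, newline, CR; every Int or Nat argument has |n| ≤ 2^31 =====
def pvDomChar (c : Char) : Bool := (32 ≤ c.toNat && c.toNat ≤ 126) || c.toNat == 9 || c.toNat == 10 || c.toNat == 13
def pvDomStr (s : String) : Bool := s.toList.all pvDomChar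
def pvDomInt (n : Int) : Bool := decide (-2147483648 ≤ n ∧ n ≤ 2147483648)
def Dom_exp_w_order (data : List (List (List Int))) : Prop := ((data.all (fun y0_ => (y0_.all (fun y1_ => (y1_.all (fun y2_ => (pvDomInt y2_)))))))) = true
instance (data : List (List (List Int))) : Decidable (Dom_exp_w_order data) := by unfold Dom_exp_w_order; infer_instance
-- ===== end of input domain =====

-- B replaces A's incremental one-step-rotation loop and index-based reversal loop by direct
-- slice rotations and a reversed() comprehension; return value only, no mutation either way.

-- ===== PORT A =====
-- svg_mix: loop threads (data, fin_lis); tmp = [data[x] for x in range(1,len)] + [data[0]].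
-- indices are always in range when read, so pyGetD with a default is exact here.
def svg_mix (data : List (List (List Int))) : List (List (List (List Int))) :=
  ((List.range data.length).foldl
    (fun (st : (List (List (List Int))) × (List (List (List (List Int))))) _ =>
      let tmp := ((PySem.List.pyRange 1 (st.1.length : Int) 1).map
                    (fun x => PySem.List.pyGetD st.1 x [])) ++ [PySem.List.pyGetD st.1 0 []]
      (tmp, st.2 ++ [tmp]))
    (data, [])).2

def svg_reverse (data : List (List Int)) : List (List Int) :=
  ((PySem.List.pyRange 0 (data.length : Int) 1).reverse).foldl
    (fun acc i => acc ++ [PySem.List.pyGetD data i []]) []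

def exp_w_order (data : List (List (List Int))) : List (List (List (List Int))) :=
  let data1 := svg_mix data
  let reverse_lis := (PySem.List.pyRange 0 (data.length : Int) 1).foldl
    (fun acc i => acc ++ [svg_reverse (PySem.List.pyGetD data i [])]) []
  let data2 := svg_mix reverse_lis
  data1 ++ data2

-- ===== PORT B =====
def exp_w_order_alt (data : List (List (List Int))) : List (List (List (List Int))) :=
  let n := data.length
  let block1 := (PySem.List.pyRange 1 ((n : Int) + 1) 1).map
    (fun i => PySem.List.slice data (some i) none ++ PySem.List.slice data none (some i))
  let rev := data.map (fun s => s.reverse)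
  let block2 := (PySem.List.pyRange 1 ((n : Int) + 1) 1).map
    (fun i => PySem.List.slice rev (some i) none ++ PySem.List.slice rev none (some i))
  block1 ++ block2

-- ===== PRECONDITION & SPEC =====
def Spec_exp_w_order (data : List (List (List Int))) (out : List (List (List (List Int)))) : Prop := out = exp_w_order_alt data
instance (data : List (List (List Int))) (out : List (List (List (List Int)))) : Decidable (Spec_exp_w_order data out) := by unfold Spec_exp_w_order; infer_instance

-- ===== CLAIM (what is proved, stated in full; the proofs are below) =====
def Claim_equal_exp_w_order : Prop := ∀ (data : List (List (List Int))), Dom_exp_w_order data → Spec_exp_w_order data (exp_w_order data)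

-- ===== LEMMAS AND PROOFS =====

-- the rotation both sides compute
def pvRot (k : Nat) (d : List (List (List Int))) : List (List (List Int)) :=
  d.drop k ++ d.take k

lemma pvRot_length (k : Nat) (d : List (List (List Int))) : (pvRot k d).length = d.length := by
  simp [pvRot]; omega

lemma pvRot_step (k : Nat) (d : List (List (List Int))) (hk : k < d.length) :
    pvRot 1 (pvRot k d) = pvRot (k + 1) d := by
  unfold pvRot
  rw [List.drop_eq_getElem_cons hk]
  have h1 : ((d[k] :: d.drop (k + 1)) ++ d.take k).drop 1 = d.drop (k + 1) ++ d.take k := rfl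
  have h2 : ((d[k] :: d.drop (k + 1)) ++ d.take k).take 1 = [d[k]] := rfl
  rw [h1, h2, List.take_add_one, List.getElem?_eq_getElem hk]
  simp

-- A's loop body computes one rotation step
lemma pvMixStep (d : List (List (List Int))) (hd : d ≠ []) :
    ((PySem.List.pyRange 1 (d.length : Int) 1).map (fun x => PySem.List.pyGetD d x []))
      ++ [PySem.List.pyGetD d 0 []] = pvRot 1 d := by
  rw [PySem.List.map_pyGetD_pyRange' d [] (a := 1) (by omega)]
  have : PySem.List.pyGetD d 0 [] = d.getD 0 [] := PySem.List.pyGetD_zero d []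
  rw [this]
  cases d with
  | nil => exact absurd rfl hd
  | cons x xs => simp [pvRot]

-- invariant of A's svg_mix fold
lemma pvMix_invariant (data : List (List (List Int))) (m : Nat) (hm : m ≤ data.length) :
    (List.range m).foldl
      (fun (st : (List (List (List Int))) × (List (List (List (List Int))))) _ =>
        let tmp := ((PySem.List.pyRange 1 (st.1.length : Int) 1).map
                      (fun x => PySem.List.pyGetD st.1 x [])) ++ [PySem.List.pyGetD st.1 0 []]
        (tmp, st.2 ++ [tmp]))
      (data, [])
    = (pvRot m data, (List.range m).map (fun i => pvRot (i + 1) data)) := by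
  induction m with
  | zero => simp [pvRot]
  | succ m ih =>
    have hm' : m ≤ data.length := Nat.le_of_succ_le hm
    rw [List.range_succ, List.foldl_append, ih hm']
    have hne : pvRot m data ≠ [] := by
      have := pvRot_length m data
      intro h; rw [h] at this; simp at this; omega
    simp only [List.foldl_cons, List.foldl_nil]
    rw [pvMixStep (pvRot m data) hne, pvRot_step m data (by omega)]
    simp

lemma pvMix_eq (data : List (List (List Int))) :
    svg_mix data = (List.range data.length).map (fun i => pvRot (i + 1) data) := by
  unfold svg_mix
  rw [pvMix_invariant data data.length (le_refl _)]

lemma pvReverse_eq (d : List (List Int)) : svg_reverse d = d.reverse := by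
  unfold svg_reverse
  rw [PySem.List.foldl_append_singleton_eq_map]
  rw [List.map_reverse, PySem.List.map_pyGetD_pyRange_zero' d []]
  simp

-- B's blocks are the same rotations
lemma pvBlock_eq (d : List (List (List Int))) :
    (PySem.List.pyRange 1 ((d.length : Int) + 1) 1).map
      (fun i => PySem.List.slice d (some i) none ++ PySem.List.slice d none (some i))
    = (List.range d.length).map (fun i => pvRot (i + 1) d) := by
  rw [PySem.List.pyRange_one, List.map_map]
  have hlen : ((d.length : Int) + 1 - 1).toNat = d.length := by omega
  rw [hlen]
  apply List.map_congr_left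
  intro k _
  simp only [Function.comp]
  have h1 : (1 : Int) + (k : Int) = ((k + 1 : Nat) : Int) := by push_cast; ring
  rw [h1, PySem.List.slice_from_natCast, PySem.List.slice_to_natCast, pvRot]

theorem exp_w_order_spec : Claim_equal_exp_w_order := by
  intro data _
  unfold Spec_exp_w_order exp_w_order exp_w_order_alt
  rw [PySem.List.foldl_append_singleton_eq_map]
  simp only [List.nil_append]
  have hrl : List.map (fun i => svg_reverse (PySem.List.pyGetD data i []))
      (PySem.List.pyRange 0 (data.length : Int) 1) = data.map (fun s => s.reverse) := by
    rw [show (fun i => svg_reverse (PySem.List.pyGetD data i []))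
          = (fun s => svg_reverse s) ∘ (fun i => PySem.List.pyGetD data i []) from rfl,
        ← List.map_map, PySem.List.map_pyGetD_pyRange_zero' data []]
    exact List.map_congr_left (fun d _ => pvReverse_eq d)
  have h2 := pvBlock_eq (data.map (fun s => s.reverse))
  simp only [List.length_map] at h2
  rw [hrl, pvMix_eq, pvMix_eq, pvBlock_eq, h2, List.length_map]
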